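-- pv_equiv track=rewrite | github.com/h-spear/problem-solving-python | programmers/level0/ranking.py | solution
-- ===== SOURCE A (Python) =====
-- def solution(score):
--     temp = [x + y for x, y in score]
--     temp.sort(reverse=True)
--     rank = [i for i in range(1, len(score) + 1)]
--     _dict = {}
--     for i in range(len(score) - 1):
--         if temp[i] == temp[i + 1]:
--             rank[i + 1] = rank[i]
--
--     for r, s in zip(rank, temp):
--         _dict[s] = r
--
--     return [_dict[x + y] for x, y in score]
-- ===== SOURCE B (Python) =====
-- def solution(score):
--     # rank of (x, y) = 1 + number of entries with a strictly greater sum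
--     return [1 + sum(1 for a, b in score if a + b > x + y) for x, y in score]
-- ===== Notes on version B (the rewrite author's own statement) =====
-- stated objective: simpler
-- what changed: Replaces sort + rank-propagation loop + sum-to-rank dict with a direct one-line count: each entry's rank is 1 plus the number of entries with strictly greater sum.
import Mathlib
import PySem

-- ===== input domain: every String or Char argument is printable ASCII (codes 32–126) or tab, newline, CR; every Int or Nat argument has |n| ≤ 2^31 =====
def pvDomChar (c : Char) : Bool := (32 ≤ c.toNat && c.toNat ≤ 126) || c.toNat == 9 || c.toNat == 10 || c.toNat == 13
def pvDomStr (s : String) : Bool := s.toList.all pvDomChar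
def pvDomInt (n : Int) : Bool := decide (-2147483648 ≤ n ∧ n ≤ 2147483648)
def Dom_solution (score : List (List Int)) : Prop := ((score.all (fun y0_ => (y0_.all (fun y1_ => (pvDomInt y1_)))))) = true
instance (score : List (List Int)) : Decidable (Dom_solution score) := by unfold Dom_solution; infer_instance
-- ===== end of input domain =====

-- B replaces A's sort + rank-propagation loop + sum→rank dict by a direct count:
-- rank of an entry = 1 + number of entries with a strictly greater sum (objective: simpler).

-- ===== PORT A =====
-- Python's 'for x, y in …' unpacking of a pair: exact when the inner list has exactly 2
-- elements (Pre_solution guarantees that); on other shapes Python raises, which Pre_ excludes.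
def pairSum (l : List Int) : Int :=
  match l with
  | x :: y :: _ => x + y
  | _ => 0

def solution (score : List (List Int)) : List Int :=
  let temp0 := score.map (fun p => pairSum p)
  let temp := PySem.List.sorted temp0 (fun x => x) true
  let n := score.length
  let rank0 := PySem.List.pyRange 1 ((n : Int) + 1) 1
  -- 'for i in range(len(score)-1)': every index accessed is in range, so Nat getD indexing is exact
  let rank := (List.range (n - 1)).foldl
    (fun r i => if temp.getD i 0 = temp.getD (i + 1) 0 then r.set (i + 1) (r.getD i 0) else r) rank0
  let d := (rank.zip temp).foldl (fun d rs => d.insert rs.2 rs.1) (PySem.Dict.empty : PySem.Dict Int Int)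
  -- '_dict[x + y]': every such sum occurs in temp hence is a key, so KeyError cannot fire
  score.map (fun p => (d.get? (pairSum p)).getD 0)

-- ===== PORT B =====
def solution_alt (score : List (List Int)) : List Int :=
  score.map (fun p => 1 + (score.countP (fun q => decide (pairSum p < pairSum q)) : Int))

-- ===== PRECONDITION & SPEC =====
-- Pre_ excludes inner lists whose length is not 2: Python's 'for x, y in score' raises ValueError there.
def Pre_solution (score : List (List Int)) : Prop := ∀ l ∈ score, l.length = 2
instance (score : List (List Int)) : Decidable (Pre_solution score) := by unfold Pre_solution; infer_instance

def pvWitness_solution : List (List Int) := [[1, 2], [3, 4], [1, 2]]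

def Spec_solution (score : List (List Int)) (out : List Int) : Prop := out = solution_alt score
instance (score : List (List Int)) (out : List Int) : Decidable (Spec_solution score out) := by unfold Spec_solution; infer_instance

-- ===== CLAIM (what is proved, stated in full; the proofs are below) =====
def Claim_equal_solution : Prop := ∀ (score : List (List Int)), Dom_solution score → Pre_solution score → Spec_solution score (solution score)

-- ===== LEMMAS AND PROOFS =====

-- number of elements of T strictly greater than s
def cntGT (T : List Int) (s : Int) : Nat := T.countP (fun t => decide (s < t))

theorem desc_getElem {T : List Int} (hp : T.Pairwise (fun a b => b ≤ a)) {j k : Nat}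
    (hjk : j ≤ k) (hk : k < T.length) :
    T[k] ≤ T[j]'(lt_of_le_of_lt hjk hk) := by
  rcases Nat.eq_or_lt_of_le hjk with h | h
  · subst h; rfl
  · exact (List.pairwise_iff_getElem.1 hp) j k (lt_of_le_of_lt hjk hk) hk h

theorem cntGT_head {T : List Int} (hp : T.Pairwise (fun a b => b ≤ a)) (h : 0 < T.length) :
    cntGT T (T[0]'h) = 0 := by
  unfold cntGT
  refine List.countP_eq_zero.2 ?_
  intro a ha
  obtain ⟨k, hk, rfl⟩ := List.mem_iff_getElem.1 ha
  simpa using desc_getElem hp (Nat.zero_le k) hk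

theorem cntGT_succ_ne {T : List Int} (hp : T.Pairwise (fun a b => b ≤ a)) {m : Nat}
    (hm : m + 1 < T.length) (hne : T[m]'(by omega) ≠ T[m + 1]'hm) :
    cntGT T (T[m + 1]'hm) = m + 1 := by
  have hlt : T[m + 1]'hm < T[m]'(by omega) :=
    lt_of_le_of_ne (desc_getElem hp (Nat.le_succ m) hm) (fun e => hne e.symm)
  unfold cntGT
  have h1 : (T.take (m + 1)).countP (fun t => decide (T[m + 1]'hm < t)) = m + 1 := by
    have := List.countP_eq_length (l := T.take (m + 1)) (p := fun t => decide (T[m + 1]'hm < t))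
    rw [this.2, List.length_take]
    · omega
    · intro a ha
      obtain ⟨k, hk, rfl⟩ := List.mem_iff_getElem.1 ha
      have hk' : k < m + 1 := by
        have := hk; simp [List.length_take] at this; omega
      have : T[m]'(by omega) ≤ (T.take (m + 1))[k]'hk := by
        rw [List.getElem_take]
        exact desc_getElem hp (by omega) (by omega)
      exact decide_eq_true (lt_of_lt_of_le hlt this)
  have h2 : (T.drop (m + 1)).countP (fun t => decide (T[m + 1]'hm < t)) = 0 := by
    refine List.countP_eq_zero.2 ?_
    intro a ha
    obtain ⟨k, hk, rfl⟩ := List.mem_iff_getElem.1 ha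
    rw [List.getElem_drop]
    simp only [decide_eq_true_eq, not_lt]
    exact desc_getElem hp (Nat.le_add_right _ _) (by simp at hk ⊢; omega)
  calc T.countP (fun t => decide (T[m + 1]'hm < t))
      = (T.take (m + 1) ++ T.drop (m + 1)).countP (fun t => decide (T[m + 1]'hm < t)) := by
        rw [List.take_append_drop]
    _ = m + 1 := by rw [List.countP_append, h1, h2]

theorem loop_len (T : List Int) (m : Nat) (r0 : List Int) :
    ((List.range m).foldl
      (fun r i => if T.getD i 0 = T.getD (i + 1) 0 then r.set (i + 1) (r.getD i 0) else r) r0).length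
    = r0.length := by
  induction m with
  | zero => rfl
  | succ m ih =>
    rw [List.range_succ, List.foldl_append, List.foldl_cons, List.foldl_nil]
    split
    · rw [List.length_set]; exact ih
    · exact ih

theorem loop_inv (T : List Int) (hp : T.Pairwise (fun a b => b ≤ a)) (m : Nat) (hm : m < T.length) :
    ∀ i, (hi : i < T.length) →
      ((List.range m).foldl
        (fun r i => if T.getD i 0 = T.getD (i + 1) 0 then r.set (i + 1) (r.getD i 0) else r)
        ((List.range T.length).map (fun k : Nat => 1 + (k : Int)))).getD i 0
      = if i ≤ m then 1 + (cntGT T (T[i]'hi) : Int) else (i : Int) + 1 := by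
  induction m with
  | zero =>
    intro i hi
    simp only [List.range_zero, List.foldl_nil]
    rw [List.getD_eq_getElem _ _ (by simpa using hi), List.getElem_map, List.getElem_range]
    by_cases h0 : i = 0
    · subst h0; rw [if_pos (Nat.le_refl 0), cntGT_head hp hi]
    · rw [if_neg (by omega)]; ring
  | succ m ih =>
    intro i hi
    have hm' : m < T.length := by omega
    have ih' := ih hm'
    rw [List.range_succ, List.foldl_append]
    simp only [List.foldl_cons, List.foldl_nil]
    set R := (List.range m).foldl
        (fun r i => if T.getD i 0 = T.getD (i + 1) 0 then r.set (i + 1) (r.getD i 0) else r)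
        ((List.range T.length).map (fun k : Nat => 1 + (k : Int))) with hR
    have hRlen : R.length = T.length := by rw [hR, loop_len]; simp
    have hTg : T.getD m 0 = T[m]'hm' := List.getD_eq_getElem _ _ hm'
    have hTg1 : T.getD (m + 1) 0 = T[m + 1]'hm := List.getD_eq_getElem _ _ hm
    rw [hTg, hTg1]
    by_cases heq : T[m]'hm' = T[m + 1]'hm
    · rw [if_pos heq]
      by_cases hi1 : i = m + 1
      · subst hi1
        rw [List.getD_eq_getElem _ _ (by rw [List.length_set, hRlen]; exact hi),
            List.getElem_set_self (by simp only [List.length_set, hRlen]; omega), ih' m hm', if_pos (Nat.le_refl m),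
            if_pos (Nat.le_refl (m + 1)), heq]
      · rw [List.getD_eq_getElem _ _ (by rw [List.length_set, hRlen]; exact hi),
            List.getElem_set_ne (by omega)]
        rw [← List.getD_eq_getElem R 0 (by rw [hRlen]; exact hi), ih' i hi]
        by_cases hle : i ≤ m
        · rw [if_pos hle, if_pos (by omega)]
        · rw [if_neg hle, if_neg (by omega)]
    · rw [if_neg heq, ih' i hi]
      by_cases hi1 : i = m + 1
      · subst hi1
        rw [if_neg (by omega), if_pos (by omega), cntGT_succ_ne hp hm heq]
        push_cast; ring
      · by_cases hle : i ≤ m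
        · rw [if_pos hle, if_pos (by omega)]
        · rw [if_neg hle, if_neg (by omega)]

theorem dict_val (f : Int → Int) :
    ∀ (pairs : List (Int × Int)) (d : PySem.Dict Int Int),
      (∀ p ∈ pairs, p.1 = f p.2) → (∀ k v, d.get? k = some v → v = f k) →
      ∀ k v, (pairs.foldl (fun d rs => d.insert rs.2 rs.1) d).get? k = some v → v = f k := by
  intro pairs
  induction pairs with
  | nil => intro d _ hd k v h; exact hd k v h
  | cons p rest ih =>
    intro d hps hd k v h
    refine ih (d.insert p.2 p.1) (fun q hq => hps q (List.mem_cons_of_mem _ hq)) ?_ k v h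
    intro k' v' hk'
    rw [PySem.Dict.get?_insert] at hk'
    by_cases hkp : k' = p.2
    · rw [if_pos hkp] at hk'
      obtain rfl : p.1 = v' := by injection hk'
      rw [hkp]; exact hps p (List.mem_cons_self) 
    · rw [if_neg hkp] at hk'
      exact hd k' v' hk'

theorem dict_some :
    ∀ (pairs : List (Int × Int)) (d : PySem.Dict Int Int) (k : Int),
      ((d.get? k).isSome ∨ k ∈ pairs.map (·.2)) →
      ((pairs.foldl (fun d rs => d.insert rs.2 rs.1) d).get? k).isSome := by
  intro pairs
  induction pairs with
  | nil => intro d k h; simpa using h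
  | cons p rest ih =>
    intro d k h
    refine ih (d.insert p.2 p.1) k ?_
    rcases h with h | h
    · left
      rw [PySem.Dict.get?_insert]
      split
      · simp
      · exact h
    · simp only [List.map_cons, List.mem_cons] at h
      rcases h with h | h
      · left; rw [PySem.Dict.get?_insert, if_pos h]; simp
      · right; exact h

theorem key_result (L : List Int) (s : Int) (hs : s ∈ L) :
    (((((List.range (L.length - 1)).foldl
        (fun r i => if (PySem.List.sorted L (fun x => x) true).getD i 0
            = (PySem.List.sorted L (fun x => x) true).getD (i + 1) 0
          then r.set (i + 1) (r.getD i 0) else r)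
        ((List.range L.length).map (fun k : Nat => 1 + (k : Int)))).zip
          (PySem.List.sorted L (fun x => x) true)).foldl
        (fun d rs => d.insert rs.2 rs.1) (PySem.Dict.empty : PySem.Dict Int Int)).get? s).getD 0
    = 1 + (L.countP (fun t => decide (s < t)) : Int) := by
  have hTlen : (PySem.List.sorted L (fun x => x) true).length = L.length :=
    PySem.List.length_sorted L (fun x => x) true
  rw [← hTlen]
  set T := PySem.List.sorted L (fun x => x) true with hT
  have hperm : T.Perm L := PySem.List.sorted_perm L (fun x => x) true
  have hp : T.Pairwise (fun a b => b ≤ a) := PySem.List.sorted_pairwise_rev L (fun x => x)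
  have hsT : s ∈ T := hperm.mem_iff.2 hs
  have hn : 0 < T.length := List.length_pos_of_mem hsT
  set R := (List.range (T.length - 1)).foldl
      (fun r i => if T.getD i 0 = T.getD (i + 1) 0 then r.set (i + 1) (r.getD i 0) else r)
      ((List.range T.length).map (fun k : Nat => 1 + (k : Int))) with hRdef
  have hRlen : R.length = T.length := by rw [hRdef, loop_len]; simp
  have hinv := loop_inv T hp (T.length - 1) (by omega)
  rw [← hRdef] at hinv
  have hRi : ∀ i, (hi : i < T.length) → R.getD i 0 = 1 + (cntGT T (T[i]'hi) : Int) := by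
    intro i hi
    rw [hinv i hi, if_pos (by omega)]
  have hpairs : ∀ q ∈ R.zip T, q.1 = 1 + (cntGT T q.2 : Int) := by
    intro q hq
    obtain ⟨j, hj, rfl⟩ := List.mem_iff_getElem.1 hq
    have hjT : j < T.length := by
      have := hj; rw [List.length_zip, hRlen] at this; omega
    rw [List.getElem_zip]
    have h := hRi j hjT
    rw [List.getD_eq_getElem _ _ (by omega)] at h
    simpa using h
  have hsnd : (R.zip T).map (·.2) = T := by
    simpa using List.map_snd_zip (le_of_eq hRlen.symm)
  have hsome := dict_some (R.zip T) PySem.Dict.empty s (Or.inr (by rw [hsnd]; exact hsT))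
  obtain ⟨v, hv⟩ := Option.isSome_iff_exists.1 hsome
  have hveq : v = 1 + (cntGT T s : Int) :=
    dict_val (fun t => 1 + (cntGT T t : Int)) (R.zip T) PySem.Dict.empty hpairs
      (by intro k v h; simp [PySem.Dict.get?_empty] at h) s v hv
  rw [hv]
  simp only [Option.getD_some, hveq]
  congr 2
  unfold cntGT
  exact hperm.countP_eq _

-- ===== VERDICT (by name: the statement is the Claim_ definition above) =====
theorem solution_spec : Claim_equal_solution := by
  unfold Claim_equal_solution
  intro score _ _
  unfold Spec_solution solution solution_alt
  simp only []
  apply List.map_congr_left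
  intro p hps
  have hlen : (score.map (fun p => pairSum p)).length = score.length := by simp
  have hr0 : PySem.List.pyRange 1 ((score.length : Int) + 1) 1
      = (List.range score.length).map (fun k : Nat => 1 + (k : Int)) := by
    rw [PySem.List.pyRange_one]
    have h' : (((score.length : Int) + 1) - 1).toNat = score.length := by omega
    rw [h']
  rw [hr0, ← hlen]
  rw [key_result (score.map (fun p => pairSum p)) (pairSum p) (List.mem_map_of_mem hps)]
  rw [List.countP_map]
  rfl
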